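-- pv_equiv track=rewrite | github.com/BioinfoMachineLearning/MULTICOM3 | bml_casp15/monomer_structure_refinement/iterative_refine_pipeline_v4_50.py | build_alignment_indices
-- ===== SOURCE A (Python) =====
-- def build_alignment_indices(sequence, start_index):
--     indices_list = []
--     counter = start_index
--     for symbol in sequence:
--         if symbol == '-':
--             indices_list.append(-1)
--         else:
--             indices_list.append(counter)
--             counter += 1
--     return indices_list
-- ===== SOURCE B (Python) =====
-- def build_alignment_indices(sequence, start_index):
--     # pass 1: prefix table of cumulative non-gap counts
--     cum = []
--     c = 0
--     for s in sequence:
--         c += (s != '-')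
--         cum.append(c)
--     # pass 2: transform each symbol using the table
--     return [-1 if s == '-' else start_index + k - 1 for s, k in zip(sequence, cum)]
-- ===== Notes on version B (the rewrite author's own statement) =====
-- stated objective: alternative
-- what changed: Replaces the single mutable-counter loop with a two-pass decomposition: first a prefix table of cumulative non-gap counts, then a zip-and-map that computes start_index + count - 1 for non-gaps and -1 for gaps.
import Mathlib
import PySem

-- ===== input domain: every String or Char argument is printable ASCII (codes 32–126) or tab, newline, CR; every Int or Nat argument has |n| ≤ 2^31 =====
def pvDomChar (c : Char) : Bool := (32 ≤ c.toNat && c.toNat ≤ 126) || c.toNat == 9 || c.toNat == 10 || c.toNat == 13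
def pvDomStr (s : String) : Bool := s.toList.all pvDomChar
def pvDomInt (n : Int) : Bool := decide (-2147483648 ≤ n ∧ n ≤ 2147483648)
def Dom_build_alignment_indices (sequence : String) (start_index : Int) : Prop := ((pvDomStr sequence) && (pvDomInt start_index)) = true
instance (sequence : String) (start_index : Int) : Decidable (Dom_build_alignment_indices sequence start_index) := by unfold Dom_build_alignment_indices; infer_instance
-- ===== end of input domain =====

-- B replaces A's single mutable-counter loop by a prefix table of cumulative non-gap counts plus a zip-and-map transform (alternative decomposition, same cost).


-- ===== PORT A =====
-- literal port: one pass, accumulator = (indices_list, counter)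
def build_alignment_indices (sequence : String) (start_index : Int) : List Int :=
  (sequence.toList.foldl
    (fun (st : List Int × Int) symbol =>
      if symbol = '-' then (st.1 ++ [-1], st.2)
      else (st.1 ++ [st.2], st.2 + 1))
    ([], start_index)).1

-- ===== PORT B =====
-- pass 1: prefix table of cumulative non-gap counts; pass 2: zip-and-map transform
def build_alignment_indices_alt (sequence : String) (start_index : Int) : List Int :=
  let cum := (sequence.toList.foldl
    (fun (st : List Int × Int) s =>
      let c := st.2 + (if s ≠ '-' then 1 else 0)
      (st.1 ++ [c], c))
    ([], 0)).1
  (sequence.toList.zip cum).map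
    (fun p => if p.1 = '-' then -1 else start_index + p.2 - 1)

-- ===== PRECONDITION & SPEC =====
def Spec_build_alignment_indices (sequence : String) (start_index : Int) (out : List Int) : Prop := out = build_alignment_indices_alt sequence start_index
instance (sequence : String) (start_index : Int) (out : List Int) : Decidable (Spec_build_alignment_indices sequence start_index out) := by unfold Spec_build_alignment_indices; infer_instance

-- ===== CLAIM (what is proved, stated in full; the proofs are below) =====
def Claim_equal_build_alignment_indices : Prop := ∀ (sequence : String) (start_index : Int), Dom_build_alignment_indices sequence start_index → Spec_build_alignment_indices sequence start_index (build_alignment_indices sequence start_index)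

-- ===== LEMMAS AND PROOFS =====

-- recursive characterisation of A's loop
def goA : List Char → Int → List Int
  | [], _ => []
  | s :: r, c => if s = '-' then -1 :: goA r c else c :: goA r (c + 1)

-- recursive characterisation of B's prefix table
def goC : List Char → Int → List Int
  | [], _ => []
  | s :: r, c =>
    let c' := c + (if s ≠ '-' then 1 else 0)
    c' :: goC r c'

theorem foldlA_eq (l : List Char) (acc : List Int) (c : Int) :
    (l.foldl (fun (st : List Int × Int) symbol =>
      if symbol = '-' then (st.1 ++ [-1], st.2)
      else (st.1 ++ [st.2], st.2 + 1)) (acc, c)).1 = acc ++ goA l c := by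
  induction l generalizing acc c with
  | nil => simp [goA]
  | cons s r ih =>
    by_cases h : s = '-' <;> simp [goA, h, ih]

theorem foldlC_eq (l : List Char) (acc : List Int) (c : Int) :
    (l.foldl (fun (st : List Int × Int) s =>
      let c' := st.2 + (if s ≠ '-' then 1 else 0)
      (st.1 ++ [c'], c')) (acc, c)).1 = acc ++ goC l c := by
  induction l generalizing acc c with
  | nil => simp [goC]
  | cons s r ih =>
    simp only [List.foldl_cons, goC]
    rw [ih]
    simp

theorem zip_map_eq (l : List Char) (st c0 : Int) :
    (l.zip (goC l c0)).map
      (fun p => if p.1 = '-' then -1 else st + p.2 - 1) = goA l (st + c0) := by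
  induction l generalizing c0 with
  | nil => simp [goA, goC]
  | cons s r ih =>
    by_cases h : s = '-'
    · simp [goA, goC, h, ih]
    · have e : st + (c0 + 1) = st + c0 + 1 := by ring
      simp only [goA, goC, h, if_neg, List.zip_cons_cons, List.map_cons, ih, e, if_false,
        ne_eq, not_false_eq_true, if_true]
      congr 1
      ring

-- ===== VERDICT (by name: the statement is the Claim_ definition above) =====
theorem build_alignment_indices_spec : Claim_equal_build_alignment_indices := by
  intro sequence start_index _
  unfold Spec_build_alignment_indices build_alignment_indices build_alignment_indices_alt
  rw [foldlA_eq, foldlC_eq]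
  simp only [List.nil_append]
  rw [zip_map_eq]
  norm_num
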